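-- pv_equiv track=rewrite | github.com/janael-pinheiro/hacker_hank_solutions | hacker_hank/gem_stones.py | gem_stones
-- ===== SOURCE A (Python) =====
-- from typing import List
--
-- def gem_stones(arr: List[str]):
--     count = 0
--     base_elements = set(arr[0])
--     for element in base_elements:
--         s = 1
--         for stone in arr[1:]:
--             if element in stone:
--                 s += 1
--         if s == len(arr):
--             count += 1
--     return count
-- ===== SOURCE B (Python) =====
-- def gem_stones(arr):
--     common = set(arr[0])
--     for stone in arr[1:]:
--         common &= set(stone)
--     return len(common)
-- ===== Notes on version B (the rewrite author's own statement) =====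
-- stated objective: idiomatic
-- what changed: Replaces A's per-character counting loop (count how many strings contain each candidate, then compare to len(arr)) with a progressive set intersection folded over the remaining strings.
import Mathlib
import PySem

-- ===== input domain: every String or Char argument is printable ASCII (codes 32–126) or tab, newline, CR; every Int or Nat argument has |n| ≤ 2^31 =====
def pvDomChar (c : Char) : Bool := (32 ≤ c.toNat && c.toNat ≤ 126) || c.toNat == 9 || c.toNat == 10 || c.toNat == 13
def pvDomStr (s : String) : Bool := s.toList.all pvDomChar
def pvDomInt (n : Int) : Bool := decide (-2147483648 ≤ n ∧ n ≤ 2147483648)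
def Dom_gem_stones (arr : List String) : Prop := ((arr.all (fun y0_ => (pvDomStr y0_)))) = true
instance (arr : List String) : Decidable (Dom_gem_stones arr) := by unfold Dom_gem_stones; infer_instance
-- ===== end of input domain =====

-- B replaces A's per-character count-in-how-many-strings loop with a progressive set intersection; idiomatic, same result.


-- ===== PORT A =====
def gem_stones (arr : List String) : Int :=
  let base_elements : PySem.Set Char := PySem.Set.ofList (PySem.List.pyGetD arr 0 "").toList
  base_elements.foldl
    (fun count element =>
      let s : Int :=
        (PySem.List.slice arr (some 1) none).foldl
          (fun s stone => if stone.toList.contains element then s + 1 else s) 1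
      if s = (arr.length : Int) then count + 1 else count)
    0

-- ===== PORT B =====
def gem_stones_alt (arr : List String) : Int :=
  let common : PySem.Set Char :=
    (PySem.List.slice arr (some 1) none).foldl
      (fun c stone => PySem.Set.inter c (PySem.Set.ofList stone.toList))
      (PySem.Set.ofList (PySem.List.pyGetD arr 0 "").toList)
  PySem.Set.len common

-- ===== PRECONDITION & SPEC =====
-- A indexes arr[0], raising IndexError on an empty list; B raises the same way, so only arr = [] is excluded.
def Pre_gem_stones (arr : List String) : Prop := arr ≠ []
instance (arr : List String) : Decidable (Pre_gem_stones arr) := by unfold Pre_gem_stones; infer_instance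
def pvWitness_gem_stones : List String := ["abc", "bcd", "cb"]

def Spec_gem_stones (arr : List String) (out : Int) : Prop := out = gem_stones_alt arr
instance (arr : List String) (out : Int) : Decidable (Spec_gem_stones arr out) := by unfold Spec_gem_stones; infer_instance

-- ===== CLAIM (what is proved, stated in full; the proofs are below) =====
def Claim_equal_gem_stones : Prop := ∀ (arr : List String), Dom_gem_stones arr → Pre_gem_stones arr → Spec_gem_stones arr (gem_stones arr)

-- ===== LEMMAS AND PROOFS =====

-- B's intersection fold filters the base set by "every remaining string contains e".
lemma foldl_inter_eq_filter (t : List String) (base : List Char) :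
    t.foldl (fun c stone => PySem.Set.inter c (PySem.Set.ofList stone.toList)) base
      = base.filter (fun e => t.all (fun stone => (PySem.Set.ofList stone.toList).contains e)) := by
  induction t generalizing base with
  | nil => simp
  | cons st rest ih =>
      rw [List.foldl_cons, ih]
      simp only [PySem.Set.inter, List.filter_filter, List.all_cons]
      congr 1
      funext e
      rw [Bool.and_comm]

-- membership in set(stone) is membership in stone
lemma contains_ofList (stone : String) (e : Char) :
    (PySem.Set.ofList stone.toList).contains e = stone.toList.contains e := by
  simp [PySem.Set.contains, PySem.Set.mem_ofList]

-- A's counting loop equals the length of B's filtered set, pointwise on any base list.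
lemma count_eq_filter_len (t : List String) (base : List Char) :
    base.foldl
      (fun count element =>
        if (t.foldl (fun s stone => if stone.toList.contains element then s + 1 else s) (1 : Int))
            = ((t.length + 1 : Nat) : Int) then count + 1 else count) (0 : Int)
      = ((base.filter (fun e => t.all (fun stone => (PySem.Set.ofList stone.toList).contains e))).length : Int) := by
  have h : ∀ element : Char,
      ((t.foldl (fun s stone => if stone.toList.contains element then s + 1 else s) (1 : Int))
          = ((t.length + 1 : Nat) : Int))
        ↔ (t.all (fun stone => (PySem.Set.ofList stone.toList).contains element) = true) := by
    intro element
    rw [PySem.List.foldl_count_if (fun stone => stone.toList.contains element) t 1]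
    simp only [contains_ofList]
    rw [List.all_eq_true]
    constructor
    · intro hc
      have : List.countP (fun stone => stone.toList.contains element) t = t.length := by omega
      exact fun a ha => (List.countP_eq_length.mp this) a ha
    · intro hall
      have : List.countP (fun stone => stone.toList.contains element) t = t.length :=
        List.countP_eq_length.mpr hall
      omega
  have := PySem.List.foldl_count_if
    (fun element => t.all (fun stone => (PySem.Set.ofList stone.toList).contains element)) base 0
  simp only [h]
  rw [this]
  simp [List.countP_eq_length_filter]

-- ===== VERDICT (by name: the statement is the Claim_ definition above) =====
theorem gem_stones_spec : Claim_equal_gem_stones := by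
  intro arr _ hpre
  obtain ⟨h, t, rfl⟩ : ∃ h t, arr = h :: t := by
    cases arr with
    | nil => exact absurd rfl hpre
    | cons h t => exact ⟨h, t, rfl⟩
  unfold Spec_gem_stones gem_stones gem_stones_alt
  simp only [PySem.List.slice_from_one, List.tail_cons, PySem.List.pyGetD_zero_cons,
    PySem.Set.len, foldl_inter_eq_filter, List.length_cons]
  exact count_eq_filter_len t _
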